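-- pv_equiv track=rewrite | github.com/PF2100/FP-Project-IST | Project1/Project-1.py | validar_cifra_entrada
-- ===== SOURCE A (Python) =====
-- def validar_cifra_entrada(tuplo):
--     if tuplo == "" or not isinstance(tuplo,str):
--         return False
--     for elem in range(len(tuplo)) :
--         if not (122>=ord(tuplo[0])>=97 and 122>=ord(tuplo[-1])>= 97) \
--         or (ord(tuplo[elem])==45 and ord(tuplo[elem+1])==45)  :
--             return False
--         elif not (122>=ord(tuplo[elem])>=97 or ord(tuplo[elem]) == 45):
--             return False
--     return True
-- ===== SOURCE B (Python) =====
-- def validar_cifra_entrada(tuplo):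
--     # Single-pass DFA for the language [a-z]+(-[a-z]+)* :
--     # state 0 = start, 1 = just read a letter (accepting), 2 = just read a dash.
--     if not isinstance(tuplo, str):
--         return False
--     state = 0
--     for c in tuplo:
--         if 'a' <= c <= 'z':
--             state = 1
--         elif c == '-' and state == 1:
--             state = 2
--         else:
--             return False
--     return state == 1
-- ===== Notes on version B (the rewrite author's own statement) =====
-- stated objective: alternative
-- what changed: Replaces A's index loop (which re-tests the first/last characters at every position and compares adjacent indices for double dashes) with a three-state finite automaton for the language [a-z]+(-[a-z]+)*, scanned in one pass over the characters with no indexing and no endpoint re-checks.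
import Mathlib
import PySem

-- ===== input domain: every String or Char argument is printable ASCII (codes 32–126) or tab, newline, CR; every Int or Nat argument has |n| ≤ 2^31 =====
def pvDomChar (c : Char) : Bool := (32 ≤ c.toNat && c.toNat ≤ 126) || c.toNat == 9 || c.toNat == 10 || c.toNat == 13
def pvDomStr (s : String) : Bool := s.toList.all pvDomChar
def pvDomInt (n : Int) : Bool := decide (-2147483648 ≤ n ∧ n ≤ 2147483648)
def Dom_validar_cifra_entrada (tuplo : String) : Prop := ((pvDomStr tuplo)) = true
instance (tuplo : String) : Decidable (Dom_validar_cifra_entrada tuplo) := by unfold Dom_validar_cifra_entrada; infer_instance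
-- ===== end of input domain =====

-- B replaces A's index loop (endpoint re-checks + adjacent-index dash comparison) by a
-- single-pass three-state finite automaton for the language [a-z]+(-[a-z]+)*: alternative.

-- ===== PORT A =====
-- 122>=ord(x)>=97 on a possibly-failing lookup (none = IndexError, unreachable in A: see loop comment)
def pvLow? (o : Option Char) : Bool :=
  match o with
  | some c => decide (97 ≤ c.toNat ∧ c.toNat ≤ 122)
  | none => false

-- ord(x)==45 on a possibly-failing lookup
def pvDash? (o : Option Char) : Bool := o == some '-'

-- the 'for elem in range(len(tuplo))' loop of A, step for step.  The access tuplo[elem+1]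
-- (pyGet? cs (elem+1), none at elem = len-1) is evaluated only when tuplo[-1] is lowercase AND
-- tuplo[elem] is '-', which is impossible at elem = len-1, exactly as in Python's short-circuit.
def pvLoopA (cs : List Char) (elem : Nat) : Bool :=
  if elem < cs.length then
    if (!(pvLow? (PySem.List.pyGet? cs 0) && pvLow? (PySem.List.pyGet? cs (-1)))) ||
       (pvDash? (PySem.List.pyGet? cs (elem : Int)) && pvDash? (PySem.List.pyGet? cs ((elem : Int) + 1))) then
      false
    else if !(pvLow? (PySem.List.pyGet? cs (elem : Int)) || pvDash? (PySem.List.pyGet? cs (elem : Int))) then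
      false
    else pvLoopA cs (elem + 1)
  else true
termination_by cs.length - elem

def validar_cifra_entrada (tuplo : String) : Bool :=
  if tuplo.toList.isEmpty then false else pvLoopA tuplo.toList 0

-- ===== PORT B =====
-- B's for-loop over the characters with the integer `state` accumulator, one clause per branch;
-- the early `return False` of Source B is the final `false` clause, the trailing
-- `return state == 1` is the `[]` clause.
def pvDFA (cs : List Char) (state : Nat) : Bool :=
  match cs with
  | [] => state == 1
  | c :: rest =>
    if 'a' ≤ c ∧ c ≤ 'z' then pvDFA rest 1
    else if c == '-' && state == 1 then pvDFA rest 2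
    else false

def validar_cifra_entrada_alt (tuplo : String) : Bool :=
  pvDFA tuplo.toList 0

-- ===== PRECONDITION & SPEC =====
def Spec_validar_cifra_entrada (tuplo : String) (out : Bool) : Prop := out = validar_cifra_entrada_alt tuplo
instance (tuplo : String) (out : Bool) : Decidable (Spec_validar_cifra_entrada tuplo out) := by unfold Spec_validar_cifra_entrada; infer_instance

-- ===== CLAIM (what is proved, stated in full; the proofs are below) =====
def Claim_equal_validar_cifra_entrada : Prop := ∀ (tuplo : String), Dom_validar_cifra_entrada tuplo → Spec_validar_cifra_entrada tuplo (validar_cifra_entrada tuplo)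

-- ===== LEMMAS AND PROOFS =====

-- character-level abbreviations used only in the proofs
def lowC (c : Char) : Bool := decide (97 ≤ c.toNat ∧ c.toNat ≤ 122)
def validC (c : Char) : Bool := lowC c || c == '-'
def notDD (a b : Char) : Prop := ¬(a = '-' ∧ b = '-')

-- the structural characterisation both programs are reduced to
def GoodT (cs : List Char) : Prop :=
  (∀ c ∈ cs, validC c = true) ∧ List.IsChain notDD cs ∧
    (∀ c, cs.getLast? = some c → lowC c = true)

lemma lowC_ne_dash {c : Char} (h : lowC c = true) : c ≠ '-' := by
  intro hc; subst hc; simp [lowC] at h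

lemma char_le_iff (c : Char) : ('a' ≤ c ∧ c ≤ 'z') ↔ (97 ≤ c.toNat ∧ c.toNat ≤ 122) := by
  rw [Char.le_def, Char.le_def, UInt32.le_iff_toNat_le, UInt32.le_iff_toNat_le]
  exact Iff.rfl

lemma goodT_cons {c : Char} {t : List Char} (hlc : lowC c = true) :
    GoodT (c :: t) ↔ GoodT t := by
  have hcd : c ≠ '-' := lowC_ne_dash hlc
  constructor
  · rintro ⟨hall, hch, hlast⟩
    refine ⟨fun x hx => hall x (List.mem_cons_of_mem _ hx),
           (List.isChain_cons.mp hch).2, ?_⟩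
    intro x hx
    cases t with
    | nil => simp at hx
    | cons d u => exact hlast x (by rw [List.getLast?_cons_cons]; exact hx)
  · rintro ⟨hall, hch, hlast⟩
    refine ⟨?_, ?_, ?_⟩
    · intro x hx
      rcases List.mem_cons.mp hx with rfl | hx
      · simp [validC, hlc]
      · exact hall x hx
    · rw [List.isChain_cons]
      exact ⟨fun b _ => fun ⟨h1, _⟩ => hcd h1, hch⟩
    · intro x hx
      cases t with
      | nil => simp at hx; subst hx; exact hlc
      | cons d u => rw [List.getLast?_cons_cons] at hx; exact hlast x hx

lemma dfa1_iff : ∀ (n : Nat) (cs : List Char), cs.length = n →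
    (pvDFA cs 1 = true ↔ GoodT cs) := by
  intro n
  induction n using Nat.strong_induction_on with
  | _ n ih =>
    intro cs hn
    match cs with
    | [] =>
      simp only [pvDFA, GoodT]
      simp [List.IsChain.nil]
    | c :: t =>
      have hlt : t.length < n := by simp only [List.length_cons] at hn; omega
      rw [pvDFA]
      by_cases hlc : lowC c = true
      · rw [if_pos ((char_le_iff c).mpr (by simpa [lowC] using hlc))]
        rw [ih t.length hlt t rfl, goodT_cons hlc]
      · rw [if_neg (fun h => hlc ((by simpa [lowC] using (char_le_iff c).mp h)))]
        by_cases hcd : c = '-'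
        · subst hcd
          rw [show ((('-' : Char) == '-') && ((1 : Nat) == 1)) = true by decide, if_pos rfl]
          match t, hn, hlt with
          | [], hn, hlt =>
            simp only [pvDFA]
            constructor
            · intro h; simp at h
            · rintro ⟨_, _, hlast⟩
              have := hlast '-' (by simp)
              simp [lowC] at this
          | d :: u, hn, hlt =>
            have hu : u.length < n := by simp only [List.length_cons] at hn; omega
            rw [pvDFA]
            by_cases hld : lowC d = true
            · rw [if_pos ((char_le_iff d).mpr (by simpa [lowC] using hld))]
              rw [ih u.length hu u rfl]
              have hdd : d ≠ '-' := lowC_ne_dash hld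
              have hgood : GoodT ('-' :: d :: u) ↔ GoodT u := by
                constructor
                · rintro ⟨hall, hch, hlast⟩
                  exact (goodT_cons (t := u) hld).mp
                    ⟨fun x hx => hall x (by simp [hx]), (List.isChain_cons.mp hch).2,
                     fun x hx => hlast x (by rw [List.getLast?_cons_cons]; exact hx)⟩
                · intro hu'
                  obtain ⟨hall, hch, hlast⟩ := (goodT_cons (t := u) hld).mpr hu'
                  refine ⟨?_, List.isChain_cons_cons.mpr ⟨fun ⟨_, h2⟩ => hdd h2, hch⟩, ?_⟩
                  · intro x hx
                    rcases List.mem_cons.mp hx with rfl | hx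
                    · simp [validC]
                    · exact hall x hx
                  · intro x hx
                    rw [List.getLast?_cons_cons] at hx
                    exact hlast x hx
              rw [hgood]
            · rw [if_neg (fun h => hld ((by simpa [lowC] using (char_le_iff d).mp h)))]
              by_cases hdd : d = '-'
              · subst hdd
                rw [show ((('-' : Char) == '-') && ((2 : Nat) == 1)) = false by decide]
                simp only [Bool.false_eq_true, if_false]
                constructor
                · intro h; simp at h
                · rintro ⟨_, hch, _⟩
                  exact ((List.isChain_cons_cons.mp hch).1 ⟨rfl, rfl⟩).elim
              · rw [if_neg (by simp)]
                constructor
                · intro h; simp at h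
                · rintro ⟨hall, _, _⟩
                  have := hall d (by simp)
                  simp [validC, hld, hdd] at this
        · rw [if_neg (by simp [hcd])]
          constructor
          · intro h; simp at h
          · rintro ⟨hall, _, _⟩
            have := hall c (by simp)
            simp [validC, hlc, hcd] at this

-- DFA from the start state
lemma dfa0_cons (c : Char) (t : List Char) :
    pvDFA (c :: t) 0 = true ↔ (lowC c = true ∧ GoodT (c :: t)) := by
  rw [pvDFA]
  by_cases hlc : lowC c = true
  · rw [if_pos ((char_le_iff c).mpr (by simpa [lowC] using hlc))]
    rw [dfa1_iff t.length t rfl, goodT_cons hlc]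
    simp [hlc]
  · rw [if_neg (fun h => hlc ((by simpa [lowC] using (char_le_iff c).mp h)))]
    rw [show ((c == '-') && ((0 : Nat) == 1)) = false by simp]
    simp [hlc]

-- A's loop from index `elem`, when the first/last check passes, is the pointwise condition on [elem, len)
lemma pvLoopA_char (cs : List Char)
    (hfl : (pvLow? (PySem.List.pyGet? cs 0) && pvLow? (PySem.List.pyGet? cs (-1))) = true) (elem : Nat) :
    pvLoopA cs elem = true ↔
      ∀ i, elem ≤ i → i < cs.length →
        ((pvLow? cs[i]? || pvDash? cs[i]?) = true ∧ ¬(pvDash? cs[i]? = true ∧ pvDash? cs[i + 1]? = true)) := by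
  have H : ∀ (n elem : Nat), cs.length - elem = n →
      (pvLoopA cs elem = true ↔
        ∀ i, elem ≤ i → i < cs.length →
          ((pvLow? cs[i]? || pvDash? cs[i]?) = true ∧
            ¬(pvDash? cs[i]? = true ∧ pvDash? cs[i + 1]? = true))) := by
    intro n
    induction n using Nat.strong_induction_on with
    | _ n ih =>
      intro elem hn
      rw [pvLoopA]
      by_cases hlt : elem < cs.length
      · rw [if_pos hlt]
        have hget : PySem.List.pyGet? cs (elem : Int) = cs[elem]? := by
          simp [PySem.List.pyGet?_natCast]
        have hget1 : PySem.List.pyGet? cs ((elem : Int) + 1) = cs[elem + 1]? := by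
          have := PySem.List.pyGet?_natCast cs (elem + 1)
          simpa [Nat.cast_add] using this
        rw [hfl, hget, hget1]
        simp only [Bool.not_true, Bool.false_or]
        by_cases hd : (pvDash? cs[elem]? && pvDash? cs[elem + 1]?) = true
        · rw [if_pos hd]
          rw [Bool.and_eq_true] at hd
          constructor
          · intro h; simp at h
          · intro h; exact ((h elem le_rfl hlt).2 ⟨hd.1, hd.2⟩).elim
        · rw [if_neg hd]
          rw [Bool.and_eq_true] at hd
          by_cases hv : (pvLow? cs[elem]? || pvDash? cs[elem]?) = true
          · rw [hv]
            simp only [Bool.not_true, Bool.false_eq_true, if_false]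
            rw [ih (cs.length - (elem + 1)) (by omega) (elem + 1) rfl]
            constructor
            · intro h i hle hi
              rcases Nat.lt_or_ge elem i with h' | h'
              · exact h i h' hi
              · have : i = elem := le_antisymm (by omega) hle
                subst this
                exact ⟨hv, fun ⟨a, b⟩ => hd ⟨a, b⟩⟩
            · intro h i hle hi; exact h i (by omega) hi
          · rw [Bool.not_eq_true] at hv
            rw [hv]
            simp only [Bool.not_false, if_true]
            constructor
            · intro h; simp at h
            · intro h
              exact absurd (h elem le_rfl hlt).1 (by simp [hv])
      · rw [if_neg hlt]
        constructor
        · intro _ i hle hi; omega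
        · intro _; rfl
  exact H (cs.length - elem) elem rfl

lemma pvLoopA_false (cs : List Char) (hne : 0 < cs.length)
    (hfl : (pvLow? (PySem.List.pyGet? cs 0) && pvLow? (PySem.List.pyGet? cs (-1))) = false) :
    pvLoopA cs 0 = false := by
  rw [pvLoopA, if_pos hne, hfl]
  simp

-- index-wise "all characters valid" ↔ membership form
lemma all_char_iff (cs : List Char) :
    (∀ i, (h : i < cs.length) → (pvLow? cs[i]? || pvDash? cs[i]?) = true) ↔
      ∀ c ∈ cs, validC c = true := by
  constructor
  · intro h c hc
    obtain ⟨i, hi, rfl⟩ := List.getElem_of_mem hc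
    have := h i hi
    simpa [List.getElem?_eq_getElem hi, pvLow?, pvDash?, validC, lowC] using this
  · intro h i hi
    have := h cs[i] (List.getElem_mem hi)
    simpa [List.getElem?_eq_getElem hi, pvLow?, pvDash?, validC, lowC] using this

-- index-wise "no adjacent dashes" ↔ IsChain form
lemma no_dd_iff (cs : List Char) :
    (∀ i, i < cs.length → ¬(pvDash? cs[i]? = true ∧ pvDash? cs[i + 1]? = true)) ↔
      List.IsChain notDD cs := by
  rw [List.isChain_iff_getElem]
  constructor
  · intro h i hi1
    have := h i (by omega)
    simp only [List.getElem?_eq_getElem (show i < cs.length by omega),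
      List.getElem?_eq_getElem hi1, pvDash?] at this
    intro ⟨h1, h2⟩
    exact this ⟨by simp [h1], by simp [h2]⟩
  · intro h i hi
    by_cases hi1 : i + 1 < cs.length
    · have := h i hi1
      simp only [List.getElem?_eq_getElem hi, List.getElem?_eq_getElem hi1, pvDash?]
      intro ⟨h1, h2⟩
      simp only [Option.some.injEq, beq_iff_eq] at h1 h2
      exact this ⟨h1, h2⟩
    · have : cs[i + 1]? = none := List.getElem?_eq_none (by omega)
      rw [this]
      intro ⟨_, h2⟩
      simp [pvDash?] at h2

-- ===== VERDICT (by name: the statement is the Claim_ definition above) =====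
theorem validar_cifra_entrada_spec : Claim_equal_validar_cifra_entrada := by
  intro tuplo _
  unfold Spec_validar_cifra_entrada validar_cifra_entrada validar_cifra_entrada_alt
  by_cases hemp : tuplo.toList.isEmpty = true
  · rw [if_pos hemp]
    have : tuplo.toList = [] := by simpa [List.isEmpty_iff] using hemp
    rw [this]; rfl
  · rw [if_neg hemp]
    have hne : tuplo.toList ≠ [] := by simpa [List.isEmpty_iff] using hemp
    obtain ⟨c, t, hcs⟩ : ∃ c t, tuplo.toList = c :: t := by
      cases h : tuplo.toList with
      | nil => exact absurd h hne
      | cons c t => exact ⟨c, t, rfl⟩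
    rw [hcs]
    have h0 : pvLow? (PySem.List.pyGet? (c :: t) 0) = lowC c := by
      rw [PySem.List.pyGet?_zero_cons]; rfl
    have hlast : (c :: t).getLast? = some ((c :: t).getLast (by simp)) :=
      List.getLast?_eq_some_getLast (by simp)
    have hL : pvLow? (PySem.List.pyGet? (c :: t) (-1)) = lowC ((c :: t).getLast (by simp)) := by
      rw [PySem.List.pyGet?_neg_one, hlast]; rfl
    rw [Bool.eq_iff_iff, dfa0_cons]
    by_cases hfl : (pvLow? (PySem.List.pyGet? (c :: t) 0) && pvLow? (PySem.List.pyGet? (c :: t) (-1))) = true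
    · have hfl' := hfl
      rw [h0, hL, Bool.and_eq_true] at hfl'
      rw [pvLoopA_char _ hfl 0]
      constructor
      · intro h
        refine ⟨hfl'.1, (all_char_iff _).mp (fun i hi => (h i (Nat.zero_le i) hi).1),
               (no_dd_iff _).mp (fun i hi => (h i (Nat.zero_le i) hi).2), ?_⟩
        intro x hx
        rw [hlast] at hx
        injection hx with hx
        exact hx ▸ hfl'.2
      · rintro ⟨_, hall, hch, _⟩
        intro i _ hi
        exact ⟨(all_char_iff _).mpr hall i hi, (no_dd_iff _).mpr hch i hi⟩
    · rw [Bool.not_eq_true] at hfl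
      rw [pvLoopA_false _ (by simp) hfl]
      have hfl' := hfl
      rw [h0, hL, Bool.and_eq_false_iff] at hfl'
      constructor
      · intro h; simp at h
      · rintro ⟨hlc, _, _, hlastlow⟩
        rcases hfl' with h | h
        · exact absurd hlc (by simp [h])
        · exact absurd (hlastlow _ hlast) (by simp [h])
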